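-- pv_equiv track=rewrite | github.com/ujjwaljain0/hackathon | src/agents/scrum_master_agent.py | _summarize_assignments
-- ===== SOURCE A (Python) =====
-- from typing import Any, Dict, List, Optional, Tuple
--
-- def _summarize_assignments(planned_issues: List[Dict[str, Any]]) -> Dict[str, int]:
--     """Summarize task assignments by team member."""
--     assignments = {}
--     for issue in planned_issues:
--         assignee = issue["assignee"]
--         if assignee not in assignments:
--             assignments[assignee] = 0
--         assignments[assignee] += 1
--     return assignments
-- ===== SOURCE B (Python) =====
-- def _summarize_assignments(planned_issues):
--     """Summarize task assignments by team member."""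
--     assignees = [issue["assignee"] for issue in planned_issues]
--
--     def tally(xs):
--         if not xs:
--             return {}
--         head = xs[0]
--         rest = [x for x in xs[1:] if x != head]
--         out = {head: len(xs) - len(rest)}
--         out.update(tally(rest))
--         return out
--
--     return tally(assignees)
-- ===== Notes on version B (the rewrite author's own statement) =====
-- stated objective: alternative
-- what changed: Replaces A's single accumulating dict-counter pass with a recursive partition-and-remove tally: take the first assignee, strip all its occurrences from the rest (its count is the length drop), and recurse on the shrunken list; no counter dict is maintained.
import Mathlib
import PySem

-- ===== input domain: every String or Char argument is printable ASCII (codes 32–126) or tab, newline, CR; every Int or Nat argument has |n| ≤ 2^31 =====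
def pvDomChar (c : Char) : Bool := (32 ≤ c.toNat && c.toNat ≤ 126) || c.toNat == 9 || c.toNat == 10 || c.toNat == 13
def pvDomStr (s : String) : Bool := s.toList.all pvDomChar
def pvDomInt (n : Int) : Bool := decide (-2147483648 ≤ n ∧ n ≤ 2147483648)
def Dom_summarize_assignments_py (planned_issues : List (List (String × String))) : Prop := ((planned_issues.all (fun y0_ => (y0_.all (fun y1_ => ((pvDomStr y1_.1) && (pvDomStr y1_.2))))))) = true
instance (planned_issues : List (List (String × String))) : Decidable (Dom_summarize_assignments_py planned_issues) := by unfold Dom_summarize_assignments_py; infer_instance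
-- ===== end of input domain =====

-- B replaces A's single accumulating dict-counter pass by a recursive partition-and-remove
-- tally (count the first assignee by the length drop after stripping it, recurse on the rest) — alternative, not faster.

-- issue["assignee"]: first-match lookup in the association list (KeyError = none, excluded by Pre_)
def pvAssignee (issue : List (String × String)) : String :=
  (List.lookup "assignee" issue).getD ""

-- ===== PORT A =====
def summarize_assignments_py (planned_issues : List (List (String × String))) : List (String × Int) :=
  (planned_issues.foldl (fun (assignments : PySem.Dict String Int) issue =>
      let assignee := pvAssignee issue
      let assignments :=
        if assignments.contains assignee then assignments
        else assignments.insert assignee 0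
      assignments.insert assignee (assignments.getD assignee 0 + 1))
    PySem.Dict.empty).items

-- ===== PORT B =====
-- the inner recursive 'tally': count of the head = len(xs) - len(rest), recurse on rest
def pvTally (xs : List String) : List (String × Int) :=
  match xs with
  | [] => []
  | h :: t =>
    let rest := t.filter (fun x => x ≠ h)
    (h, ((1 + t.length : Int) - rest.length)) :: pvTally rest
termination_by xs.length
decreasing_by
  simp only [List.length_cons, List.length_unattach]
  exact Nat.lt_succ_of_le (le_trans (List.length_filter_le _ _) (by simp))

def summarize_assignments_py_alt (planned_issues : List (List (String × String))) : List (String × Int) :=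
  pvTally (planned_issues.map pvAssignee)

-- ===== PRECONDITION & SPEC =====
-- Pre_ excludes exactly the inputs where some issue lacks the "assignee" key, on which A raises KeyError.
def Pre_summarize_assignments_py (planned_issues : List (List (String × String))) : Prop :=
  ∀ issue ∈ planned_issues, "assignee" ∈ issue.map Prod.fst
instance (planned_issues : List (List (String × String))) : Decidable (Pre_summarize_assignments_py planned_issues) := by unfold Pre_summarize_assignments_py; infer_instance

def pvWitness_summarize_assignments_py : (List (List (String × String))) :=
  [[("assignee", "alice")], [("assignee", "bob"), ("points", "3")], [("assignee", "alice")]]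

def Spec_summarize_assignments_py (planned_issues : List (List (String × String))) (out : List (String × Int)) : Prop := out = summarize_assignments_py_alt planned_issues
instance (planned_issues : List (List (String × String))) (out : List (String × Int)) : Decidable (Spec_summarize_assignments_py planned_issues out) := by unfold Spec_summarize_assignments_py; infer_instance

-- ===== CLAIM =====
def Claim_equal_summarize_assignments_py : Prop := ∀ (planned_issues : List (List (String × String))), Dom_summarize_assignments_py planned_issues → Pre_summarize_assignments_py planned_issues → Spec_summarize_assignments_py planned_issues (summarize_assignments_py planned_issues)

-- ===== LEMMAS AND PROOFS =====

-- inserting a fresh key twice is inserting it once with the last value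
theorem insert_zero_insert_one (d : PySem.Dict String Int) (a : String)
    (h : d.contains a = false) : (d.insert a 0).insert a 1 = d.insert a 1 := by
  apply PySem.Dict.ext
  have hc : (d.insert a 0).contains a = true := PySem.Dict.contains_insert_self d a 0
  rw [PySem.Dict.items_insert, PySem.Dict.items_insert, PySem.Dict.items_insert]
  simp only [hc, h, Bool.false_eq_true, if_true, if_false, List.map_append]
  have hne : ∀ p ∈ d.items, p.1 ≠ a := by
    intro p hp hpa
    have : a ∈ d.keys := by
      simp only [PySem.Dict.keys]
      exact List.mem_map.2 ⟨p, hp, hpa⟩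
    rw [← PySem.Dict.contains_iff_mem_keys] at this
    simp [h] at this
  have hmap : d.items.map (fun p => if p.1 = a then (a, (1 : Int)) else p) = d.items := by
    rw [List.map_congr_left (g := id) (fun p hp => by simp [hne p hp]), List.map_id]
  simp [hmap]

-- A's loop body is the counter-style insert
theorem body_eq (d : PySem.Dict String Int) (a : String) :
    (let d1 := if d.contains a then d else d.insert a 0;
     d1.insert a (d1.getD a 0 + 1)) = d.insert a (d.getD a 0 + 1) := by
  by_cases h : d.contains a = true
  · simp [h]
  · simp only [Bool.not_eq_true] at h
    simp only [h, Bool.false_eq_true, if_false]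
    rw [PySem.Dict.getD_insert_self]
    have h0 : d.getD a 0 = 0 := by simp [PySem.Dict.getD_of_not_contains, h]
    rw [h0]
    exact insert_zero_insert_one d a h

-- folding Set.add ignores elements already in the accumulator
theorem foldl_add_filter (t : List String) (s : List String) (h : String) (hm : h ∈ s) :
    List.foldl PySem.Set.add s t = List.foldl PySem.Set.add s (t.filter (fun x => x ≠ h)) := by
  induction t generalizing s with
  | nil => rfl
  | cons x t ih =>
    by_cases hx : x = h
    · subst hx
      have hadd : PySem.Set.add s x = s := by simp [PySem.Set.add, hm]
      simp only [List.filter_cons, ne_eq, decide_not, List.foldl_cons]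
      simp [hadd, ih s hm]
    · simp only [List.filter_cons, ne_eq, decide_not, List.foldl_cons]
      simp only [hx, decide_false, Bool.not_false, if_true, List.foldl_cons]
      simpa only [ne_eq, decide_not] using
        ih (PySem.Set.add s x) (by simp [PySem.Set.add]; split <;> simp [hm])

-- a head the rest never mentions stays in front of the fold
theorem foldl_add_cons_notmem (l : List String) (a : String) (ha : a ∉ l) (s : List String) :
    List.foldl PySem.Set.add (a :: s) l = a :: List.foldl PySem.Set.add s l := by
  induction l generalizing s with
  | nil => rfl
  | cons x l ih =>
    have hxa : x ≠ a := fun h => ha (h ▸ List.mem_cons_self)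
    have hadd : PySem.Set.add (a :: s) x = a :: PySem.Set.add s x := by
      simp [PySem.Set.add, PySem.Set.contains, hxa]
      split <;> simp_all
    simp only [List.foldl_cons, hadd]
    exact ih (fun h => ha (List.mem_cons_of_mem _ h)) _

-- first-occurrence dedup peels its head and drops that head from the tail
theorem ofList_cons_filter (h : String) (t : List String) :
    PySem.Set.ofList (h :: t) = h :: PySem.Set.ofList (t.filter (fun x => x ≠ h)) := by
  have h1 : PySem.Set.ofList (h :: t) = List.foldl PySem.Set.add [h] t := by
    rw [PySem.Set.ofList_eq_foldl]; rfl
  rw [h1, foldl_add_filter t [h] h (by simp),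
      foldl_add_cons_notmem _ h (by simp) [], PySem.Set.ofList_eq_foldl]

-- the elements h removes from t are exactly its occurrences
theorem filter_ne_length (t : List String) (h : String) :
    (t.filter (fun x => x ≠ h)).length + t.count h = t.length := by
  rw [List.count_eq_length_filter, ← List.countP_eq_length_filter, ← List.countP_eq_length_filter]
  have := List.length_eq_countP_add_countP (l := t) (p := fun x => x == h)
  simp only [ne_eq, decide_not, beq_iff_eq] at *
  omega

-- B's recursive tally computes Counter(xs).items() (first-appearance order, full counts)
theorem pvTally_eq (xs : List String) :
    pvTally xs = (PySem.Set.ofList xs).map (fun a => (a, (xs.count a : Int))) := by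
  induction xs using pvTally.induct with
  | case1 => simp [pvTally]
  | case2 h t rest ih =>
    rw [pvTally]
    rw [ofList_cons_filter h t, List.map_cons]
    refine congrArg₂ List.cons ?_ ?_
    · simp only [Prod.mk.injEq, List.count_cons_self]
      refine ⟨by trivial, ?_⟩
      have := filter_ne_length t h
      push_cast
      omega
    · have hrest : rest = t.filter (fun x => x ≠ h) := by
        show (List.filter _ t.attach).unattach = _
        rw [List.unattach_filter (g := fun x => decide (x ≠ h)) (hf := fun x hx => rfl),
            List.unattach_attach]
      rw [hrest] at ih
      rw [ih]
      refine List.map_congr_left (fun a ha => ?_)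
      have hmem : a ∈ t.filter (fun x => x ≠ h) := by
        simpa using (PySem.Set.mem_ofList _ _).1 ha
      have hne : a ≠ h := by
        have := (List.mem_filter.1 hmem).2; simpa using this
      simp only [Prod.mk.injEq]
      refine ⟨by trivial, ?_⟩
      rw [List.count_filter (by simpa using hne)]
      simp [Ne.symm hne]

-- ===== VERDICT =====
theorem summarize_assignments_py_spec : Claim_equal_summarize_assignments_py := by
  intro pis _ _
  unfold Spec_summarize_assignments_py summarize_assignments_py summarize_assignments_py_alt
  have h1 : pis.foldl (fun (assignments : PySem.Dict String Int) issue =>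
      let assignee := pvAssignee issue
      let assignments :=
        if assignments.contains assignee then assignments
        else assignments.insert assignee 0
      assignments.insert assignee (assignments.getD assignee 0 + 1)) PySem.Dict.empty
      = (pis.map pvAssignee).foldl (fun d a => d.insert a (d.getD a 0 + 1)) PySem.Dict.empty := by
    rw [List.foldl_map]
    congr 1
    funext d a
    exact body_eq d (pvAssignee a)
  rw [h1, PySem.Dict.foldl_insert_getD_add_one_eq_counter, PySem.Dict.items_counter,
      pvTally_eq]
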